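-- pv_equiv track=rewrite | github.com/emmapann/AdventOfCode_2023 | day11.py | get_indices_of_hash
-- ===== SOURCE A (Python) =====
-- def get_indices_of_hash(matrix, empty_rows, empty_cols):
--     indices = []
--     for i in range(len(matrix)):
--         for j in range(len(matrix[i])):
--             if matrix[i][j] == '#':
--                 rows_to_add = 999999 * sum([i >= r for r in empty_rows])
--                 cols_to_add = 999999 * sum([j >= c for c in empty_cols])
--                 indices.append((i + rows_to_add, j + cols_to_add))
--     return indices
-- ===== SOURCE B (Python) =====
-- def get_indices_of_hash(matrix, empty_rows, empty_cols):
--     # Sort the empty-row/col lists once, then sweep a pointer over the row/col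
--     # indices to build per-index expansion offset tables, read per '#' cell.
--     def offsets(n, empties):
--         es = sorted(empties)
--         table = []
--         k = 0
--         for i in range(n):
--             while k < len(es) and es[k] <= i:
--                 k += 1
--             table.append(999999 * k)
--         return table
--     width = 0
--     for row in matrix:
--         width = max(width, len(row))
--     row_off = offsets(len(matrix), empty_rows)
--     col_off = offsets(width, empty_cols)
--     return [(i + row_off[i], j + col_off[j])
--             for i, row in enumerate(matrix)
--             for j, ch in enumerate(row) if ch == '#']
-- ===== Notes on version B (the rewrite author's own statement) =====
-- stated objective: alternative
-- what changed: B sorts the empty-row/col lists once and sweeps a pointer over the row/column indices to build per-index expansion offset tables, replacing A's per-'#'-cell rescans of both empty lists with table reads.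
import Mathlib
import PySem

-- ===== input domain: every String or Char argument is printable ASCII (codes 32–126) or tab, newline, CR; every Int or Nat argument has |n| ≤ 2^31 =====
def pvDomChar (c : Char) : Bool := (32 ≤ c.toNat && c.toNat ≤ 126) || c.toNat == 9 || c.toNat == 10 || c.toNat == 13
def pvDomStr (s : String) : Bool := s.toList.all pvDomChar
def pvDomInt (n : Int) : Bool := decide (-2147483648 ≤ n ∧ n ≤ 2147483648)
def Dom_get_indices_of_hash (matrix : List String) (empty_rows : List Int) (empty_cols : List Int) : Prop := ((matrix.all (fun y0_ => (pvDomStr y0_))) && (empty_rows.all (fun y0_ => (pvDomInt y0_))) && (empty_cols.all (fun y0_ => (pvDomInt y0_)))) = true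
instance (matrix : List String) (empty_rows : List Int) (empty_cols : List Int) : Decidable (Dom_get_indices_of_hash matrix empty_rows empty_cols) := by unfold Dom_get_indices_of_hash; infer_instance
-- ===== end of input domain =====

-- B sorts the empty-row/col lists once and sweeps a pointer over the row/column indices to
-- build per-index expansion offset tables, read once per '#' cell (alternative algorithm;
-- not measured faster).

-- ===== PORT A =====
def get_indices_of_hash (matrix : List String) (empty_rows : List Int) (empty_cols : List Int) : List (Int × Int) :=
  (PySem.List.pyRange 0 (matrix.length : Int) 1).foldl (fun indices i =>
    let row := PySem.List.pyGetD matrix i ""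
    (PySem.List.pyRange 0 (PySem.Str.len row) 1).foldl (fun indices j =>
      if PySem.Str.pyGet? row j = some '#' then
        let rows_to_add := 999999 * ((empty_rows.map (fun r => if i ≥ r then (1 : Int) else 0)).sum)
        let cols_to_add := 999999 * ((empty_cols.map (fun c => if j ≥ c then (1 : Int) else 0)).sum)
        indices ++ [(i + rows_to_add, j + cols_to_add)]
      else indices) indices) []

-- ===== PORT B =====
-- Source B's inner while loop: advance the pointer k over the sorted list while es[k] <= i
def pvAdvance (es : List Int) (i : Int) (k : Nat) : Nat :=
  if h : k < es.length then
    if es[k] ≤ i then pvAdvance es i (k + 1) else k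
  else k
termination_by es.length - k

-- Source B's helper 'offsets(n, empties)': sort once, then sweep the pointer over range(n)
def pvOffsets (n : Int) (empties : List Int) : List Int :=
  ((PySem.List.pyRange 0 n 1).foldl
      (fun (st : Nat × List Int) i =>
        let k := pvAdvance (PySem.List.sorted empties (fun x => x) false) i st.1
        (k, st.2 ++ [999999 * (k : Int)])) ((0 : Nat), ([] : List Int))).2

def get_indices_of_hash_alt (matrix : List String) (empty_rows : List Int) (empty_cols : List Int) : List (Int × Int) :=
  let width := matrix.foldl (fun w row => max w (PySem.Str.len row)) 0
  let row_off := pvOffsets (matrix.length : Int) empty_rows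
  let col_off := pvOffsets width empty_cols
  (PySem.List.enumerate matrix 0).flatMap (fun p =>
    (PySem.List.enumerate p.2.toList 0).filterMap (fun q =>
      if q.2 = '#' then
        some (p.1 + PySem.List.pyGetD row_off p.1 0, q.1 + PySem.List.pyGetD col_off q.1 0)
      else none))

-- ===== PRECONDITION & SPEC =====
def Spec_get_indices_of_hash (matrix : List String) (empty_rows : List Int) (empty_cols : List Int) (out : List (Int × Int)) : Prop := out = get_indices_of_hash_alt matrix empty_rows empty_cols
instance (matrix : List String) (empty_rows : List Int) (empty_cols : List Int) (out : List (Int × Int)) : Decidable (Spec_get_indices_of_hash matrix empty_rows empty_cols out) := by unfold Spec_get_indices_of_hash; infer_instance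

-- ===== CLAIM (what is proved, stated in full; the proofs are below) =====
def Claim_equal_get_indices_of_hash : Prop := ∀ (matrix : List String) (empty_rows : List Int) (empty_cols : List Int), Dom_get_indices_of_hash matrix empty_rows empty_cols → Spec_get_indices_of_hash matrix empty_rows empty_cols (get_indices_of_hash matrix empty_rows empty_cols)

-- ===== LEMMAS AND PROOFS =====

-- proof-only name for the list of '#' cell coordinates
def pvHits (matrix : List String) : List (Int × Int) :=
  (PySem.List.enumerate matrix 0).flatMap (fun p =>
    (PySem.List.enumerate p.2.toList 0).filterMap (fun q =>
      if q.2 = '#' then some (p.1, q.1) else none))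

def pvNaive (empty_rows empty_cols : List Int) (h : Int × Int) : Int × Int :=
  (h.1 + 999999 * ((empty_rows.map (fun r => if h.1 ≥ r then (1 : Int) else 0)).sum),
   h.2 + 999999 * ((empty_cols.map (fun c => if h.2 ≥ c then (1 : Int) else 0)).sum))

theorem pv_filterMap_ite {α β : Type} (l : List α) (p : α → Prop) [DecidablePred p] (f : α → β) :
    l.filterMap (fun x => if p x then some (f x) else none) =
      (l.filter (fun x => decide (p x))).map f := by
  induction l with
  | nil => rfl
  | cons a t ih =>
    by_cases h : p a <;> simp [h, ih]

theorem pv_flatMap_congr {α β : Type} (l : List α) (f g : α → List β)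
    (h : ∀ x ∈ l, f x = g x) : l.flatMap f = l.flatMap g := by
  induction l with
  | nil => rfl
  | cons a t ih =>
    simp only [List.flatMap_cons]
    rw [h a (by simp), ih (fun x hx => h x (by simp [hx]))]

-- every hit's row index is in range and its column index is below the running max width
theorem pv_mem_hits (matrix : List String) (h : Int × Int) (hm : h ∈ pvHits matrix) :
    0 ≤ h.1 ∧ h.1 < (matrix.length : Int) ∧ 0 ≤ h.2 ∧
      h.2 < matrix.foldl (fun w r => max w (PySem.Str.len r)) 0 := by
  unfold pvHits at hm
  rw [List.mem_flatMap] at hm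
  obtain ⟨p, hp, hinner⟩ := hm
  rw [PySem.List.mem_enumerate_iff] at hp
  obtain ⟨k, hk, rfl⟩ := hp
  rw [List.mem_filterMap] at hinner
  obtain ⟨q, hq, hq2⟩ := hinner
  by_cases hqh : q.2 = '#'
  · rw [if_pos hqh, Option.some_inj] at hq2
    rw [PySem.List.mem_enumerate_iff] at hq
    obtain ⟨m, hmlt, rfl⟩ := hq
    have hwidth := (PySem.List.le_foldl_max_int matrix PySem.Str.len 0).2
      (matrix[k]) (List.getElem_mem hk)
    rw [PySem.Str.len_eq] at hwidth
    subst hq2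
    have hmlt' : m < matrix[k].toList.length := hmlt
    refine ⟨by omega, by push_cast; omega, by omega, ?_⟩
    simp only [zero_add]
    omega
  · rw [if_neg hqh] at hq2
    exact absurd hq2 (by simp)

-- in a nondecreasing list, an index below countP(· ≤ v) holds an element ≤ v
theorem pv_lt_countP (es : List Int) (hp : es.Pairwise (· ≤ ·)) (v : Int)
    (idx : Nat) (h : idx < es.length)
    (hc : idx < es.countP (fun x => decide (x ≤ v))) : es[idx] ≤ v := by
  by_contra hgt
  rw [not_le] at hgt
  have hdrop : (es.drop idx).countP (fun x => decide (x ≤ v)) = 0 := by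
    rw [List.countP_eq_zero]
    intro a ha
    rw [List.mem_iff_getElem] at ha
    obtain ⟨j, hj, rfl⟩ := ha
    have hj' : idx + j < es.length := by rw [List.length_drop] at hj; omega
    rw [List.getElem_drop]
    have hlt : v < es[idx + j] := by
      rcases Nat.eq_zero_or_pos j with hj0 | hj0
      · subst hj0; simpa using hgt
      · have := (List.pairwise_iff_getElem.1 hp) idx (idx + j) h hj' (by omega)
        omega
    exact fun hcc => absurd (of_decide_eq_true hcc) (not_le.mpr hlt)
  have hsplit := List.countP_append (l₁ := es.take idx) (l₂ := es.drop idx)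
      (p := fun x => decide (x ≤ v))
  rw [List.take_append_drop] at hsplit
  have htake : (es.take idx).countP (fun x => decide (x ≤ v)) ≤ idx := by
    calc (es.take idx).countP (fun x => decide (x ≤ v)) ≤ (es.take idx).length :=
          List.countP_le_length
      _ ≤ idx := by simp
  omega

-- countP is k when the first k elements satisfy and the rest do not
theorem pv_countP_eq (es : List Int) (p : Int → Bool) (k : Nat) (hk : k ≤ es.length)
    (h1 : ∀ idx (h : idx < es.length), idx < k → p es[idx] = true)
    (h2 : ∀ idx (h : idx < es.length), k ≤ idx → p es[idx] = false) :
    es.countP p = k := by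
  have hsplit := List.countP_append (l₁ := es.take k) (l₂ := es.drop k) (p := p)
  rw [List.take_append_drop] at hsplit
  have htake : (es.take k).countP p = k := by
    rw [List.countP_eq_length.2, List.length_take_of_le hk]
    intro a ha
    rw [List.mem_iff_getElem] at ha
    obtain ⟨j, hj, rfl⟩ := ha
    rw [List.getElem_take]
    exact h1 j (by rw [List.length_take] at hj; omega) (by rw [List.length_take] at hj; omega)
  have hdrop : (es.drop k).countP p = 0 := by
    rw [List.countP_eq_zero]
    intro a ha
    rw [List.mem_iff_getElem] at ha
    obtain ⟨j, hj, rfl⟩ := ha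
    have hj' : k + j < es.length := by rw [List.length_drop] at hj; omega
    rw [List.getElem_drop]
    simp [h2 (k + j) hj' (by omega)]
  omega

-- the while loop lands exactly on countP(· ≤ i)
theorem pv_advance_eq (es : List Int) (hp : es.Pairwise (· ≤ ·)) (i : Int) (k : Nat)
    (hk : k ≤ es.length)
    (hbelow : ∀ idx (h : idx < es.length), idx < k → es[idx] ≤ i) :
    pvAdvance es i k = es.countP (fun x => decide (x ≤ i)) := by
  rw [pvAdvance]
  split
  · rename_i hlen
    split
    · rename_i hle
      exact pv_advance_eq es hp i (k + 1) (by omega) (fun idx h hlt => by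
        rcases Nat.lt_succ_iff_lt_or_eq.1 hlt with h' | h'
        · exact hbelow idx h h'
        · subst h'; exact hle)
    · rename_i hgt
      rw [not_le] at hgt
      refine (pv_countP_eq es _ k hk (fun idx h hlt => by simp [hbelow idx h hlt]) ?_).symm
      intro idx h hge
      have hlt : i < es[idx] := by
        rcases Nat.eq_or_lt_of_le hge with h' | h'
        · subst h'; exact hgt
        · have := (List.pairwise_iff_getElem.1 hp) k idx (by omega) h h'
          omega
      exact decide_eq_false (not_le.mpr hlt)
  · rename_i hlen
    refine (pv_countP_eq es _ k hk (fun idx h hlt => by simp [hbelow idx h hlt]) ?_).symm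
    intro idx h hge
    exact absurd h (by omega)
termination_by es.length - k

-- the sweeping loop produces the table of scaled prefix counts
theorem pv_loop (es : List Int) (hp : es.Pairwise (· ≤ ·)) (n : Int) :
    (PySem.List.pyRange 0 n 1).foldl
        (fun (st : Nat × List Int) i =>
          let k := pvAdvance es i st.1
          (k, st.2 ++ [999999 * (k : Int)])) ((0 : Nat), ([] : List Int))
      = ((if 0 < n then es.countP (fun x => decide (x ≤ n - 1)) else 0),
         (PySem.List.pyRange 0 n 1).map
           (fun i => 999999 * (es.countP (fun x => decide (x ≤ i)) : Int))) := by
  by_cases hn : n ≤ 0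
  · rw [PySem.List.pyRange_one_eq_nil hn]
    simp only [List.foldl_nil, List.map_nil]
    rw [if_neg (by omega)]
  · have h1 : (0 : Int) ≤ n - 1 := by omega
    have heq : n = (n - 1) + 1 := by omega
    rw [heq, PySem.List.pyRange_one_succ_right h1, List.foldl_append, List.map_append,
      pv_loop es hp (n - 1)]
    simp only [List.foldl_cons, List.foldl_nil, List.map_cons, List.map_nil]
    have hadv : pvAdvance es (n - 1) (if 0 < n - 1 then es.countP (fun x => decide (x ≤ n - 1 - 1)) else 0)
        = es.countP (fun x => decide (x ≤ n - 1)) := by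
      by_cases hn1 : 0 < n - 1
      · rw [if_pos hn1]
        refine pv_advance_eq es hp (n - 1) _ List.countP_le_length ?_
        intro idx h hlt
        have := pv_lt_countP es hp (n - 1 - 1) idx h hlt
        omega
      · rw [if_neg hn1]
        exact pv_advance_eq es hp (n - 1) 0 (by omega) (by omega)
    rw [hadv]
    rw [if_pos (by omega)]
    norm_num
termination_by n.toNat
decreasing_by omega

-- the offset table equals the naive per-index scan table
theorem pv_offsets_eq (n : Int) (empties : List Int) :
    pvOffsets n empties
      = (PySem.List.pyRange 0 n 1).map
          (fun i => 999999 * ((empties.map (fun r => if i ≥ r then (1 : Int) else 0)).sum)) := by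
  unfold pvOffsets
  rw [pv_loop _ (PySem.List.sorted_pairwise empties (fun x => x) ) n]
  simp only
  apply List.map_congr_left
  intro i _
  have hperm : (PySem.List.sorted empties (fun x => x) false).Perm empties :=
    PySem.List.sorted_perm empties (fun x => x) false
  rw [hperm.countP_eq]
  rw [show (fun r => if i ≥ r then (1 : Int) else 0) =
      (fun r => if decide (r ≤ i) = true then (1 : Int) else 0) from by funext r; simp,
    PySem.List.sum_map_ite_one_zero]

-- A computes exactly the naive offset map over the hit cells
theorem pv_A_eq (matrix : List String) (empty_rows empty_cols : List Int) :
    get_indices_of_hash matrix empty_rows empty_cols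
      = (pvHits matrix).map (pvNaive empty_rows empty_cols) := by
  unfold get_indices_of_hash pvHits
  rw [List.map_flatMap]
  simp only [PySem.List.foldl_append_ite, PySem.List.foldl_append_eq_flatMap, List.nil_append,
    PySem.List.enumerate_eq_map_pyRange (d := ' '), PySem.List.enumerate_eq_map_pyRange (d := ""),
    PySem.List.len_eq, List.flatMap_map, List.filterMap_map, Function.comp_def,
    pv_filterMap_ite, List.map_map]
  apply pv_flatMap_congr
  intro i hi
  rw [PySem.List.mem_pyRange_one] at hi
  set row := PySem.List.pyGetD matrix i "" with hrow
  have hlen : PySem.Str.len row = (row.toList.length : Int) := PySem.Str.len_eq row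
  rw [hlen]
  have hfilter :
      List.filter (fun j => decide (PySem.Str.pyGet? row j = some '#'))
          (PySem.List.pyRange 0 (row.toList.length : Int)) =
        List.filter (fun j => decide (PySem.List.pyGetD row.toList j ' ' = '#'))
          (PySem.List.pyRange 0 (row.toList.length : Int)) := by
    apply List.filter_congr
    intro j hj
    rw [PySem.List.mem_pyRange_one] at hj
    have hjlt : j < (row.toList.length : Int) := hj.2
    rw [PySem.Str.pyGet?_eq]
    show decide (PySem.List.pyGet? row.toList j = some '#') = _
    rw [PySem.List.pyGet?_of_nonneg row.toList hj.1,
      PySem.List.pyGetD_eq_getElem row.toList ' ' hj.1 hjlt]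
    have hjn : j.toNat < row.toList.length := by omega
    simp [List.getElem?_eq_getElem hjn]
  rw [hfilter]
  apply List.map_congr_left
  intro j _
  simp [pvNaive]

-- B computes the table lookup map over the hit cells
theorem pv_B_eq (matrix : List String) (empty_rows empty_cols : List Int) :
    get_indices_of_hash_alt matrix empty_rows empty_cols
      = (pvHits matrix).map (fun h =>
          (h.1 + PySem.List.pyGetD (pvOffsets (matrix.length : Int) empty_rows) h.1 0,
           h.2 + PySem.List.pyGetD
             (pvOffsets (matrix.foldl (fun w row => max w (PySem.Str.len row)) 0) empty_cols)
             h.2 0)) := by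
  unfold get_indices_of_hash_alt pvHits
  rw [List.map_flatMap]
  apply pv_flatMap_congr
  intro p _
  rw [List.map_filterMap]
  apply List.filterMap_congr
  intro q _
  by_cases hq : q.2 = '#' <;> simp [hq]

-- ===== VERDICT (by name: the statement is the Claim_ definition above) =====
theorem get_indices_of_hash_spec : Claim_equal_get_indices_of_hash := by
  intro matrix empty_rows empty_cols _
  unfold Spec_get_indices_of_hash
  rw [pv_A_eq matrix empty_rows empty_cols, pv_B_eq matrix empty_rows empty_cols]
  apply List.map_congr_left
  intro h hh
  obtain ⟨h1, h2, h3, h4⟩ := pv_mem_hits matrix h hh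
  rw [pv_offsets_eq, pv_offsets_eq,
    PySem.List.pyGetD_map_pyRange_of_nonneg _ _ h.1 _ h1 h2,
    PySem.List.pyGetD_map_pyRange_of_nonneg _ _ h.2 _ h3 h4]
  simp [pvNaive]
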